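-- pv_equiv track=rewrite | github.com/manishlad/adventofcode | 2018/05/alchemical_reduction.py | collapse_polymer
-- ===== SOURCE A (Python) =====
-- def collapse_polymer(polymer):
--     reduced = []
--     for unit in polymer:
--         if reduced:
--             if unit.islower():
--                 if reduced[-1] == unit.upper():
--                     reduced = reduced[:-1]
--                     continue
--             elif unit.isupper():
--                 if reduced[-1] == unit.lower():
--                     reduced = reduced[:-1]
--                     continue
--         reduced.append(unit)
--     rp = ''.join(reduced).strip()
--     return rp
-- ===== SOURCE B (Python) =====
-- def collapse_polymer(polymer):
--     # Fixed-point reduction: repeatedly sweep the string once, deleting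
--     # non-overlapping adjacent case-opposite pairs, until a sweep removes nothing.
--     def opposite(a, b):
--         return (b.islower() and a == b.upper()) or (b.isupper() and a == b.lower())
--
--     s = polymer
--     while True:
--         out = []
--         changed = False
--         i = 0
--         while i < len(s) - 1:
--             if opposite(s[i], s[i + 1]):
--                 i += 2
--                 changed = True
--             else:
--                 out.append(s[i])
--                 i += 1
--         if i == len(s) - 1:
--             out.append(s[i])
--         if not changed:
--             break
--         s = ''.join(out)
--     return s.strip()
-- ===== Notes on version B (the rewrite author's own statement) =====
-- stated objective: alternative
-- what changed: A does one left-to-right pass with an explicit stack (peek/pop on the last element); B never keeps a stack: it repeatedly sweeps the whole string deleting all non-overlapping adjacent case-opposite pairs and iterates the sweep to a fixed point, relying on confluence of the reduction.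
import Mathlib
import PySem

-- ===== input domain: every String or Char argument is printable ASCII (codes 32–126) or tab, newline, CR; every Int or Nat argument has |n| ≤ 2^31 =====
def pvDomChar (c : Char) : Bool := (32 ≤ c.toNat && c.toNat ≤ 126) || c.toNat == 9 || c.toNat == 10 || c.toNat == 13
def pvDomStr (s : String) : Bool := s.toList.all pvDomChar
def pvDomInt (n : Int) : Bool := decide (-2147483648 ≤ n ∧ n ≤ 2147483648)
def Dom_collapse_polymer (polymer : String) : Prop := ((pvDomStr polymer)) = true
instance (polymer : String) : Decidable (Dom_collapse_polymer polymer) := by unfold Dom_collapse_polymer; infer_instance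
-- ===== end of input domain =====

-- B replaces A's single left-to-right stack pass by repeated whole-string sweeps
-- (delete all non-overlapping adjacent case-opposite pairs, iterate to a fixed point);
-- objective: alternative — same result by the confluence of the reduction.

-- ===== PORT A =====
-- one step of A's loop body: the stack 'reduced', the incoming 'unit'
def pvStepA (reduced : List Char) (unit : Char) : List Char :=
  if reduced ≠ [] then
    if PySem.Chars.islower unit then
      (if PySem.List.pyGet? reduced (-1) = some (PySem.Chars.upperChar unit) then
        PySem.List.slice reduced none (some (-1))
      else reduced ++ [unit])
    else if PySem.Chars.isupper unit then
      (if PySem.List.pyGet? reduced (-1) = some (PySem.Chars.lowerChar unit) then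
        PySem.List.slice reduced none (some (-1))
      else reduced ++ [unit])
    else reduced ++ [unit]
  else reduced ++ [unit]

def collapse_polymer (polymer : String) : String :=
  PySem.Str.strip (String.ofList (polymer.toList.foldl pvStepA []))

-- ===== PORT B =====
-- Source B's opposite(a, b)
def pvOpp (a b : Char) : Bool :=
  (PySem.Chars.islower b && (a == PySem.Chars.upperChar b)) ||
  (PySem.Chars.isupper b && (a == PySem.Chars.lowerChar b))

-- one sweep of Source B's inner index loop: the produced list and the 'changed' flag
def pvPass : List Char → List Char × Bool
  | [] => ([], false)
  | [a] => ([a], false)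
  | a :: b :: t =>
    if pvOpp a b then ((pvPass t).1, true)
    else ((a :: (pvPass (b :: t)).1), (pvPass (b :: t)).2)

theorem pvPass_len_le (s : List Char) : (pvPass s).1.length ≤ s.length := by
  induction s using pvPass.induct with
  | case1 => simp [pvPass]
  | case2 a => simp [pvPass]
  | case3 a b t h ih => simp only [pvPass, if_pos h]; simpa using Nat.le_trans ih (by omega)
  | case4 a b t h ih => simp only [pvPass, if_neg h]; simpa using ih

theorem pvPass_changed_lt (s : List Char) (h : (pvPass s).2 = true) :
    (pvPass s).1.length < s.length := by
  induction s using pvPass.induct with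
  | case1 => simp [pvPass] at h
  | case2 a => simp [pvPass] at h
  | case3 a b t hc ih =>
    simp only [pvPass, if_pos hc]
    have := pvPass_len_le t
    simp; omega
  | case4 a b t hc ih =>
    simp only [pvPass, if_neg hc] at h ⊢
    have := ih h
    simp at this ⊢; omega

-- Source B's outer while-True loop
def pvLoop (s : List Char) : List Char :=
  if h : (pvPass s).2 = true then pvLoop (pvPass s).1 else s
termination_by s.length
decreasing_by exact pvPass_changed_lt s h

def collapse_polymer_alt (polymer : String) : String :=
  PySem.Str.strip (String.ofList (pvLoop polymer.toList))

-- ===== PRECONDITION & SPEC =====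
def Spec_collapse_polymer (polymer : String) (out : String) : Prop := out = collapse_polymer_alt polymer
instance (polymer : String) (out : String) : Decidable (Spec_collapse_polymer polymer out) := by unfold Spec_collapse_polymer; infer_instance

-- ===== CLAIM (what is proved, stated in full; the proofs are below) =====
def Claim_equal_collapse_polymer : Prop := ∀ (polymer : String), Dom_collapse_polymer polymer → Spec_collapse_polymer polymer (collapse_polymer polymer)

-- ===== LEMMAS AND PROOFS =====

-- The stack of A's fold, kept in REVERSED order (top = head): the clean step.
def pvRStep (stack : List Char) (u : Char) : List Char :=
  match stack with
  | [] => [u]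
  | x :: rest => if pvOpp x u then rest else u :: x :: rest

theorem pvChain_tail {R : Char → Char → Prop} {a : Char} {t : List Char}
    (h : List.IsChain R (a :: t)) : List.IsChain R t := by
  match t with
  | [] => exact List.isChain_nil
  | b :: t' => exact (List.isChain_cons_cons.mp h).2

theorem pvChain_head {R : Char → Char → Prop} {a : Char} {t : List Char} {y : Char}
    (h : List.IsChain R (a :: t)) (hy : t.head? = some y) : R a y := by
  match t with
  | [] => simp at hy
  | b :: t' =>
    simp at hy
    subst hy
    exact (List.isChain_cons_cons.mp h).1

-- no adjacent pair of a reversed stack reduces (read right-to-left)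
def pvIrred (r : List Char) : Prop := List.IsChain (fun p q => pvOpp q p = false) r

-- ---- character facts ----
theorem pvOpp_ranges {x u : Char} (h : pvOpp x u = true) :
    (97 ≤ u.toNat ∧ u.toNat ≤ 122 ∧ x.toNat + 32 = u.toNat) ∨
    (65 ≤ u.toNat ∧ u.toNat ≤ 90 ∧ x.toNat = u.toNat + 32) := by
  simp only [pvOpp, PySem.Chars.islower, PySem.Chars.isupper, PySem.Chars.upperChar,
    PySem.Chars.lowerChar, Bool.or_eq_true, Bool.and_eq_true, decide_eq_true_eq,
    beq_iff_eq, Char.le_def, UInt32.le_iff_toNat_le, Char.toNat_val] at h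
  rcases h with ⟨⟨h1, h2⟩, hx⟩ | ⟨⟨h1, h2⟩, hx⟩
  · left
    rw [if_pos] at hx
    · subst hx
      have ha : ('a' : Char).toNat = 97 := rfl
      have hz : ('z' : Char).toNat = 122 := rfl
      have hv : (Char.ofNat (u.toNat - 32)).toNat = u.toNat - 32 := by
        rw [Char.toNat_ofNat, if_pos]
        omega
      omega
    · exact ⟨h1, h2⟩
  · right
    rw [if_pos] at hx
    · subst hx
      have hA : ('A' : Char).toNat = 65 := rfl
      have hZ : ('Z' : Char).toNat = 90 := rfl
      have hv : (Char.ofNat (u.toNat + 32)).toNat = u.toNat + 32 := by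
        rw [Char.toNat_ofNat, if_pos]
        omega
      omega
    · exact ⟨h1, h2⟩

theorem pvOpp_unique {x a b : Char} (h1 : pvOpp x a = true) (h2 : pvOpp a b = true) :
    b = x := by
  have r1 := pvOpp_ranges h1
  have r2 := pvOpp_ranges h2
  have : b.toNat = x.toNat := by omega
  apply Char.ext
  apply UInt32.toNat_inj.mp
  exact this

-- ---- pvRStep preserves irreducibility ----
theorem pvIrred_rstep {r : List Char} (h : pvIrred r) (u : Char) : pvIrred (pvRStep r u) := by
  match r with
  | [] => simp [pvRStep, pvIrred]
  | x :: rest =>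
    simp only [pvRStep]
    by_cases hc : pvOpp x u = true
    · rw [if_pos hc]; exact pvChain_tail h
    · rw [if_neg hc]
      exact List.IsChain.cons_cons (by simpa using hc) h

-- ---- the two-step cancellation lemma ----
theorem pvRStep_cancel {r : List Char} (h : pvIrred r) {a b : Char} (hab : pvOpp a b = true) :
    pvRStep (pvRStep r a) b = r := by
  match r with
  | [] => simp [pvRStep, hab]
  | x :: rest =>
    simp only [pvRStep]
    by_cases hc : pvOpp x a = true
    · rw [if_pos hc]
      have hbx : b = x := pvOpp_unique hc hab
      subst hbx
      match rest with
      | [] => simp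
      | y :: rest' =>
        have hyb : pvOpp y b = false := (List.isChain_cons_cons.mp h).1
        simp [hyb]
    · rw [if_neg hc]
      simp [hab]

-- ---- one sweep does not change the stack-fold result ----
theorem pvFold_pass (s : List Char) : ∀ (acc : List Char), pvIrred acc →
    List.foldl pvRStep acc (pvPass s).1 = List.foldl pvRStep acc s := by
  induction s using pvPass.induct with
  | case1 => intro acc _; simp [pvPass]
  | case2 a => intro acc _; simp [pvPass]
  | case3 a b t hc ih =>
    intro acc hacc
    simp only [pvPass, if_pos hc, List.foldl_cons]
    rw [ih acc hacc, pvRStep_cancel hacc hc]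
  | case4 a b t hc ih =>
    intro acc hacc
    simp only [pvPass, if_neg hc, List.foldl_cons]
    exact ih (pvRStep acc a) (pvIrred_rstep hacc a)

-- ---- an unchanged sweep means the string is irreducible (forward chain) ----
theorem pvPass_false_chain (s : List Char) (h : (pvPass s).2 = false) :
    List.IsChain (fun p q => pvOpp p q = false) s := by
  induction s using pvPass.induct with
  | case1 => exact List.isChain_nil
  | case2 a => exact List.isChain_singleton a
  | case3 a b t hc ih => simp [pvPass, hc] at h
  | case4 a b t hc ih =>
    simp only [pvPass, if_neg hc] at h
    match t with
    | [] => exact List.isChain_pair.mpr (by simpa using hc)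
    | c :: t' => exact List.IsChain.cons_cons (by simpa using hc) (ih h)

-- ---- folding an irreducible string just reverses it onto the stack ----
theorem pvFold_irred (s : List Char) : ∀ (acc : List Char),
    List.IsChain (fun p q => pvOpp p q = false) s →
    (∀ x y, acc.head? = some x → s.head? = some y → pvOpp x y = false) →
    List.foldl pvRStep acc s = s.reverse ++ acc := by
  induction s with
  | nil => intro acc _ _; simp
  | cons a t ih =>
    intro acc hchain hhead
    have hstep : pvRStep acc a = a :: acc := by
      match acc with
      | [] => simp [pvRStep]
      | x :: rest =>
        have := hhead x a rfl rfl
        simp [pvRStep, this]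
    rw [List.foldl_cons, hstep, ih (a :: acc) (pvChain_tail hchain)]
    · simp
    · intro x y hx hy
      simp at hx
      subst hx
      exact pvChain_head hchain hy

-- ---- B's loop computes the reversed stack fold ----
theorem pvLoop_eq_fold (s : List Char) :
    pvLoop s = (List.foldl pvRStep [] s).reverse := by
  rw [pvLoop]
  by_cases h : (pvPass s).2 = true
  · rw [dif_pos h, pvLoop_eq_fold (pvPass s).1,
      pvFold_pass s [] List.isChain_nil]
  · rw [dif_neg h]
    rw [pvFold_irred s [] (pvPass_false_chain s (by simpa using h)) (by simp)]
    simp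
termination_by s.length
decreasing_by exact pvPass_changed_lt s h

-- ---- A's step equals the reversed clean step ----
theorem pvGet_neg_one (l : List Char) (x : Char) :
    PySem.List.pyGet? (l ++ [x]) (-1) = some x := by
  simp [PySem.List.pyGet?, PySem.List.pyIdx?]

theorem pvSlice_dropLast (l : List Char) (x : Char) :
    PySem.List.slice (l ++ [x]) none (some (-1)) = l := by
  rw [PySem.List.slice_to_neg_one]
  simp

theorem pvNotBoth (u : Char) (h : PySem.Chars.islower u = true) :
    PySem.Chars.isupper u = false := by
  simp [PySem.Chars.islower, PySem.Chars.isupper, Char.le_def, UInt32.le_iff_toNat_le] at *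
  omega

theorem pvStepA_eq (red : List Char) (u : Char) :
    pvStepA red u = (pvRStep red.reverse u).reverse := by
  induction red using List.reverseRecOn with
  | nil => simp [pvStepA, pvRStep]
  | append_singleton l x _ =>
    simp only [pvStepA, List.reverse_append, List.reverse_cons, List.reverse_nil,
      List.nil_append, List.singleton_append, pvRStep]
    rw [if_pos (by simp)]
    rw [pvGet_neg_one, pvSlice_dropLast]
    by_cases hl : PySem.Chars.islower u = true
    · rw [if_pos hl]
      have hu := pvNotBoth u hl
      by_cases he : x = PySem.Chars.upperChar u
      · rw [if_pos (by simp [he]), if_pos (by simp [pvOpp, hl, he])]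
        simp
      · rw [if_neg (by simp [he]), if_neg (by simp [pvOpp, hl, hu, he])]
        simp
    · rw [if_neg hl]
      by_cases hup : PySem.Chars.isupper u = true
      · rw [if_pos hup]
        by_cases he : x = PySem.Chars.lowerChar u
        · rw [if_pos (by simp [he]), if_pos (by simp [pvOpp, hup, he, hl])]
          simp
        · rw [if_neg (by simp [he]), if_neg (by simp [pvOpp, hl, hup, he])]
          simp
      · rw [if_neg hup, if_neg (by simp [pvOpp, hl, hup])]
        simp

theorem pvFoldA_eq (s : List Char) : ∀ (acc : List Char),
    List.foldl pvStepA acc s = (List.foldl pvRStep acc.reverse s).reverse := by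
  induction s with
  | nil => intro acc; simp
  | cons a t ih =>
    intro acc
    rw [List.foldl_cons, List.foldl_cons, ih (pvStepA acc a), pvStepA_eq]
    simp

-- ===== VERDICT (by name: the statement is the Claim_ definition above) =====
theorem collapse_polymer_spec : Claim_equal_collapse_polymer := by
  intro polymer _
  unfold Spec_collapse_polymer collapse_polymer collapse_polymer_alt
  rw [pvLoop_eq_fold, pvFoldA_eq]
  simp
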